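-- pv_equiv track=rewrite | github.com/mechanicalnull/fuzzwatch | fuzzwatch_utils.py | get_bitmap_coverage_stats
-- ===== SOURCE A (Python) =====
-- from typing import Tuple
--
-- hamming_weights = bytes(bin(x).count("1") for x in range(256))
--
-- def get_bitmap_coverage_stats(bitmap: list) -> Tuple[int, int]:
--     """Get bits/bytes covered"""
--     bits_set = 0
--     nonzero_bytes = 0
--     for i, b in enumerate(bitmap):
--         if b != 0:
--             nonzero_bytes += 1
--             bits_set += hamming_weights[b]
--     return nonzero_bytes, bits_set
-- ===== SOURCE B (Python) =====
-- from typing import Tuple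
--
-- hamming_weights = bytes(bin(x).count("1") for x in range(256))
--
-- def get_bitmap_coverage_stats(bitmap: list) -> Tuple[int, int]:
--     """Get bits/bytes covered"""
--     counts = {}
--     for b in bitmap:
--         counts[b] = counts.get(b, 0) + 1
--     nonzero_bytes = len(bitmap) - counts.get(0, 0)
--     bits_set = sum(n * hamming_weights[v] for v, n in counts.items() if v != 0)
--     return nonzero_bytes, bits_set
-- ===== Notes on version B (the rewrite author's own statement) =====
-- stated objective: alternative
-- what changed: Replaces the per-element accumulation loop with a group-and-aggregate pass: build a frequency table of byte values once, then derive nonzero_bytes as len(bitmap) minus the zero count and bits_set by summing count*weight over the distinct values.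
import Mathlib
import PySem

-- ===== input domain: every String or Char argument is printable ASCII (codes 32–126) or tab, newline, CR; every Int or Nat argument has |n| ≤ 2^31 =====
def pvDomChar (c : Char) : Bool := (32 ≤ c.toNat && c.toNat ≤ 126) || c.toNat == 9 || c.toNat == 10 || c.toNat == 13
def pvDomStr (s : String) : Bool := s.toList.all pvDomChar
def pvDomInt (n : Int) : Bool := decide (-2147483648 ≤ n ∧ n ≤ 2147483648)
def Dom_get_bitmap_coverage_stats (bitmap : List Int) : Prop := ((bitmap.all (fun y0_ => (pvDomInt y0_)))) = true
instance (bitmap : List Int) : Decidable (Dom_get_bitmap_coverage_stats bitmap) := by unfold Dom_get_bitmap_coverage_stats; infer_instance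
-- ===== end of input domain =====

-- B replaces A's per-element accumulation loop by a group-and-aggregate pass over a
-- frequency table of the distinct byte values (objective: alternative).


-- module-level constant: hamming_weights = bytes(bin(x).count("1") for x in range(256))
def hammingWeights : List Int :=
  (PySem.List.pyRange 0 256 1).map (fun x => (PySem.Int.bitCount x : Int))

-- hamming_weights[b]: Python negative indexing; none (= IndexError) is excluded by Pre_
def hw (b : Int) : Int := (PySem.List.pyGet? hammingWeights b).getD 0

-- ===== PORT A =====
def get_bitmap_coverage_stats (bitmap : List Int) : Int × Int :=
  let r := bitmap.foldl
    (fun acc b => if b ≠ 0 then (acc.1 + 1, acc.2 + hw b) else acc)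
    ((0 : Int), (0 : Int))
  (r.1, r.2)

-- ===== PORT B =====
def get_bitmap_coverage_stats_alt (bitmap : List Int) : Int × Int :=
  let counts := bitmap.foldl (fun d b => d.insert b (d.getD b 0 + 1)) (PySem.Dict.empty : PySem.Dict Int Int)
  let nonzero_bytes : Int := (bitmap.length : Int) - counts.getD 0 0
  let bits_set : Int :=
    ((counts.items.filter (fun vn => vn.1 ≠ 0)).map (fun vn => vn.2 * hw vn.1)).sum
  (nonzero_bytes, bits_set)

-- ===== PRECONDITION & SPEC =====
-- Pre_ excludes exactly the inputs where Python A raises IndexError: an element outside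
-- the index range of the 256-byte hamming_weights table.
def Pre_get_bitmap_coverage_stats (bitmap : List Int) : Prop :=
  ∀ b ∈ bitmap, -256 ≤ b ∧ b < 256
instance (bitmap : List Int) : Decidable (Pre_get_bitmap_coverage_stats bitmap) := by unfold Pre_get_bitmap_coverage_stats; infer_instance
def pvWitness_get_bitmap_coverage_stats : List Int := [0, 3, 255, -1]
def Spec_get_bitmap_coverage_stats (bitmap : List Int) (out : Int × Int) : Prop := out = get_bitmap_coverage_stats_alt bitmap
instance (bitmap : List Int) (out : Int × Int) : Decidable (Spec_get_bitmap_coverage_stats bitmap out) := by unfold Spec_get_bitmap_coverage_stats; infer_instance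

-- ===== CLAIM (what is proved, stated in full; the proofs are below) =====
def Claim_equal_get_bitmap_coverage_stats : Prop := ∀ (bitmap : List Int), Dom_get_bitmap_coverage_stats bitmap → Pre_get_bitmap_coverage_stats bitmap → Spec_get_bitmap_coverage_stats bitmap (get_bitmap_coverage_stats bitmap)

-- ===== LEMMAS AND PROOFS =====

-- A's loop, characterised
theorem foldA (xs : List Int) (nz bits : Int) :
    xs.foldl (fun acc b => if b ≠ 0 then (acc.1 + 1, acc.2 + hw b) else acc) (nz, bits)
      = (nz + (xs.countP (fun b => !decide (b = 0)) : Int),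
         bits + (xs.map (fun b => if b = 0 then 0 else hw b)).sum) := by
  induction xs generalizing nz bits with
  | nil => simp
  | cons x t ih =>
      rw [List.foldl_cons]
      by_cases hx : x = 0
      · rw [if_neg (fun h => h hx), ih]
        simp [hx, List.countP_cons]
      · rw [if_pos hx, ih]
        refine Prod.ext ?_ ?_
        · simp [List.countP_cons, hx]; push_cast; ring
        · simp [hx]; ring

-- sum of a 'hit one key' map over a nodup list
theorem sum_single (ks : List Int) (hnd : ks.Nodup) (b : Int) (hb : b ∈ ks) (c : Int) :
    (ks.map (fun k => if k = b then c else 0)).sum = c := by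
  induction ks with
  | nil => cases hb
  | cons k t ih =>
      rcases List.mem_cons.mp hb with h | h
      · subst h
        have hz : (t.map (fun k => if k = b then c else 0)).sum = 0 := by
          have hnb : b ∉ t := (List.nodup_cons.mp hnd).1
          rw [List.sum_eq_zero]
          intro x hx
          rcases List.mem_map.mp hx with ⟨y, hy, rfl⟩
          have : y ≠ b := fun h => hnb (h ▸ hy)
          simp [this]
        simp [hz]
      · have hkb : k ≠ b := by
          rintro rfl; exact (List.nodup_cons.mp hnd).1 h
        simp [hkb, ih (List.nodup_cons.mp hnd).2 h]

-- group-and-aggregate equals the per-element sum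
theorem sum_distinct (xs ks : List Int) (hnd : ks.Nodup) (hsub : ∀ b ∈ xs, b ∈ ks) :
    (ks.map (fun k => if k = 0 then 0 else (xs.count k : Int) * hw k)).sum
      = (xs.map (fun b => if b = 0 then 0 else hw b)).sum := by
  induction xs with
  | nil => simp
  | cons x t ih =>
      have hx : x ∈ ks := hsub x (List.mem_cons_self ..)
      have ht : ∀ b ∈ t, b ∈ ks := fun b hb => hsub b (List.mem_cons_of_mem _ hb)
      have hsplit : ∀ k : Int,
          (if k = 0 then 0 else (((x :: t).count k : Nat) : Int) * hw k)
            = (if k = 0 then 0 else (t.count k : Int) * hw k)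
              + (if k = x then (if x = 0 then 0 else hw x) else 0) := by
        intro k
        by_cases hkx : k = x
        · subst hkx
          by_cases hk : k = 0
          · simp [hk]
          · simp [hk, List.count_cons_self]; push_cast; ring
        · have hxk0 : ¬x = k := fun h => hkx h.symm
          have hc : (x :: t).count k = t.count k := by simp [List.count_cons, hxk0]
          by_cases hk : k = 0
          · have hxk : ¬(0 : Int) = x := fun h => hkx (hk.trans h)
            simp [hk, hc, hxk]
          · simp [hk, hkx, hc]
      calc (ks.map (fun k => if k = 0 then 0 else ((x :: t).count k : Int) * hw k)).sum
          = (ks.map (fun k => (if k = 0 then 0 else (t.count k : Int) * hw k)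
              + (if k = x then (if x = 0 then 0 else hw x) else 0))).sum := by
            exact congrArg List.sum (List.map_congr_left (fun k _ => hsplit k))
        _ = (ks.map (fun k => if k = 0 then 0 else (t.count k : Int) * hw k)).sum
            + (ks.map (fun k => if k = x then (if x = 0 then 0 else hw x) else 0)).sum := by
            rw [← List.sum_map_add]
        _ = (t.map (fun b => if b = 0 then 0 else hw b)).sum + (if x = 0 then 0 else hw x) := by
            rw [ih ht, sum_single ks hnd x hx]
        _ = ((x :: t).map (fun b => if b = 0 then 0 else hw b)).sum := by
            simp [add_comm]

theorem filter_map_sum {α : Type} (l : List α) (q : α → Bool) (f : α → Int) :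
    ((l.filter q).map f).sum = (l.map (fun x => if q x then f x else 0)).sum := by
  induction l with
  | nil => rfl
  | cons p t ih => cases hq : q p <;> simp [List.filter_cons, hq, ih]

theorem countP_ne (xs : List Int) :
    xs.countP (fun b => !decide (b = 0)) + xs.count 0 = xs.length := by
  induction xs with
  | nil => rfl
  | cons x t ih => by_cases hx : x = 0 <;> simp [List.countP_cons, List.count_cons, hx] <;> omega

-- ===== VERDICT (by name: the statement is the Claim_ definition above) =====
theorem get_bitmap_coverage_stats_spec : Claim_equal_get_bitmap_coverage_stats := by
  intro bitmap _ _
  unfold Spec_get_bitmap_coverage_stats get_bitmap_coverage_stats get_bitmap_coverage_stats_alt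
  simp only [foldA, PySem.Dict.foldl_insert_getD_add_one_eq_counter]
  rw [PySem.Dict.items_counter]
  refine Prod.ext ?_ ?_
  · have h := countP_ne bitmap
    simp [PySem.Dict.getD_counter]
    omega
  · rw [filter_map_sum, List.map_map]
    have hcg : ((fun vn : Int × Int => if decide (vn.1 ≠ 0) then vn.2 * hw vn.1 else 0) ∘
          (fun k : Int => (k, (bitmap.count k : Int))))
        = (fun k : Int => if k = 0 then 0 else (bitmap.count k : Int) * hw k) := by
      funext k
      by_cases hk : k = 0 <;> simp [hk]
    rw [hcg, sum_distinct bitmap _ (PySem.Set.nodup_ofList bitmap)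
        (fun b hb => (PySem.Set.mem_ofList ..).mpr hb)]
    simp
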